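-- pv_equiv track=rewrite | github.com/mrpara/d2_plugy_stash_organizer | BU/main.py | get_item_code
-- ===== SOURCE A (Python) =====
-- def byte_to_bits(byte_value):
--     return format(byte_value, '08b')
--
-- def reverse_bits(bits):
--     return bits[::-1]
--
-- def bit_string_to_int(bit_string):
--     out = 0
--     for bit in bit_string:
--         out = (out << 1) | int(bit)
--     return out
--
-- def read_bits(data, offset, size):
--     byte_start = int(offset / 8)
--     byte_end = int((offset + size)/8)
--     bytes_to_read = byte_end - byte_start + 1
--     res = []
--     for byte_idx in range(bytes_to_read):
--         byte = byte_start + byte_idx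
--         bits_raw = reverse_bits(byte_to_bits(data[byte]))
--         bits_to_read = [1 if offset <= byte * 8 + bit_idx < offset + size
--                         else 0
--                         for bit_idx in range(8)]
--         bits = [i for (i, v) in zip(bits_raw, bits_to_read) if v]
--         res = res + bits
--     return bit_string_to_int(reverse_bits(res))
--
-- def get_item_code(item):
--     if is_ear(item):
--         return 'ear'
--     item_code = ''
--     for i in range(4):
--         char = chr(read_bits(item, 76 + i * 8, 8))
--         if char != ' ':
--             item_code += char
--     return item_code
--
-- def is_ear(item):
--     return read_bits(item, 32, 1)
-- ===== SOURCE B (Python) =====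
-- # B: read_bits computes the value directly with integer arithmetic (one bit per
-- # iteration ORed into an accumulator), dropping A's bit-string formatting,
-- # reversing, masking and re-parsing entirely.
--
-- def read_bits(data, offset, size):
--     out = 0
--     for i in range(size):
--         pos = offset + i
--         out += ((data[pos // 8] // (1 << (pos % 8))) % 2) << i
--     return out
--
-- def is_ear(item):
--     return read_bits(item, 32, 1)
--
-- def get_item_code(item):
--     if is_ear(item):
--         return 'ear'
--     item_code = ''
--     for i in range(4):
--         char = chr(read_bits(item, 76 + i * 8, 8))
--         if char != ' ':
--             item_code += char
--     return item_code
-- ===== Notes on version B (the rewrite author's own statement) =====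
-- stated objective: simpler
-- what changed: read_bits now accumulates the value with integer bit arithmetic (one (data[pos//8] >> pos%8) & 1 probe per bit, added at weight 2^i), deleting A's byte_to_bits/reverse_bits/bit_string_to_int string pipeline and the comprehension-based masking of per-byte bit strings.
import Mathlib
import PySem

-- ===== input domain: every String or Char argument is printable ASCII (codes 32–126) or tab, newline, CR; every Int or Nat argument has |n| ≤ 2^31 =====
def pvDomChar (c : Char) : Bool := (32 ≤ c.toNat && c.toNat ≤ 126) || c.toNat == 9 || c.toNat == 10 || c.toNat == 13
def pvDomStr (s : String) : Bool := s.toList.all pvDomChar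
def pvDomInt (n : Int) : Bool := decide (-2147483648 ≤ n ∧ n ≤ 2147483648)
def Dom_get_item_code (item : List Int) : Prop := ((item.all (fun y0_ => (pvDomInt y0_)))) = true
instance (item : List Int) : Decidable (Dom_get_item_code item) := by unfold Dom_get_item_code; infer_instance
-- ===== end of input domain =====

-- B replaces A's bit-string formatting / reversing / masking / re-parsing pipeline in read_bits
-- by a direct per-bit integer accumulation (objective: simpler).


-- ===== PORT A =====
-- binary digits of a Nat, most significant first ([] for 0); helper for format(v, '08b')
def pvNatBits (n : Nat) : List Char :=
  if _h : n = 0 then [] else pvNatBits (n / 2) ++ [if n % 2 = 1 then '1' else '0']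
termination_by n
decreasing_by exact Nat.div_lt_self (Nat.pos_of_ne_zero _h) (by omega)

-- format(byte_value, '08b'): optional sign, zero-padding to total width 8, then the binary digits
def byte_to_bits (byte_value : Int) : List Char :=
  let digits := if byte_value.natAbs = 0 then ['0'] else pvNatBits byte_value.natAbs
  let sign := if byte_value < 0 then ['-'] else []
  sign ++ List.replicate (8 - (sign.length + digits.length)) '0' ++ digits

def reverse_bits (bits : List Char) : List Char := bits.reverse

-- int(bit): exact on '0'/'1', the only characters selected on inputs satisfying Pre_
-- (a selected '-' makes Python raise ValueError; those inputs are excluded by Pre_)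
def pvCharToInt (c : Char) : Int := if c = '1' then 1 else 0

def bit_string_to_int (bit_string : List Char) : Int :=
  bit_string.foldl (fun out bit => PySem.Int.bor (out <<< (1 : Nat)) (pvCharToInt bit)) 0

-- data[byte] is in range on inputs satisfying Pre_ (IndexError excluded there)
def read_bits (data : List Int) (offset size : Int) : Int :=
  let byte_start := PySem.Int.truncdiv offset 8       -- int(offset / 8), exact for these magnitudes
  let byte_end := PySem.Int.truncdiv (offset + size) 8
  let bytes_to_read := byte_end - byte_start + 1
  let res := (PySem.List.pyRange 0 bytes_to_read 1).foldl (fun res byte_idx =>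
    let byte := byte_start + byte_idx
    let bits_raw := reverse_bits (byte_to_bits (PySem.List.pyGetD data byte 0))
    let bits_to_read := (PySem.List.pyRange 0 8 1).map (fun bit_idx =>
      if offset ≤ byte * 8 + bit_idx ∧ byte * 8 + bit_idx < offset + size then (1 : Int) else 0)
    let bits := (bits_raw.zip bits_to_read).filterMap (fun p => if p.2 ≠ 0 then some p.1 else none)
    res ++ bits) []
  bit_string_to_int (reverse_bits res)

def is_ear (item : List Int) : Int := read_bits item 32 1

def get_item_code (item : List Int) : String :=
  if is_ear item ≠ 0 then "ear"
  else
    -- item_code accumulated as a list of chars, materialised once at the end (Python str concat)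
    String.ofList ((PySem.List.pyRange 0 4 1).foldl (fun item_code i =>
      let char := Char.ofNat (read_bits item (76 + i * 8) 8).toNat  -- chr(...); value in 0..255 under Pre_
      if char ≠ ' ' then item_code ++ [char] else item_code) [])

-- ===== PORT B =====
def read_bits_alt (data : List Int) (offset size : Int) : Int :=
  (PySem.List.pyRange 0 size 1).foldl (fun out i =>
    let pos := offset + i
    -- shift amounts are nonnegative at every call site (offset, size ≥ 0), so .toNat is exact
    out + (PySem.Int.mod (PySem.Int.floordiv (PySem.List.pyGetD data (PySem.Int.floordiv pos 8) 0)
            ((1 : Int) <<< (PySem.Int.mod pos 8).toNat)) 2) <<< i.toNat) 0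

def is_ear_alt (item : List Int) : Int := read_bits_alt item 32 1

def get_item_code_alt (item : List Int) : String :=
  if is_ear_alt item ≠ 0 then "ear"
  else
    String.ofList ((PySem.List.pyRange 0 4 1).foldl (fun item_code i =>
      let char := Char.ofNat (read_bits_alt item (76 + i * 8) 8).toNat
      if char ≠ ' ' then item_code ++ [char] else item_code) [])

-- ===== PRECONDITION & SPEC =====
-- Pre_ excludes items shorter than 5 (and non-ear items shorter than 14), on which A raises
-- IndexError, and non-ear items with a negative value among bytes 9–13 — malformed non-byte data
-- on which A's '08b' sign-magnitude formatting either raises ValueError (the '-' character lands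
-- in a selected bit) or returns accidental sign-magnitude bits.
def Pre_get_item_code (item : List Int) : Prop :=
  5 ≤ item.length ∧
    (item.getD 4 0 % 2 ≠ 0 ∨
      (14 ≤ item.length ∧ ∀ j ∈ [9, 10, 11, 12, 13], 0 ≤ item.getD j 0))
instance (item : List Int) : Decidable (Pre_get_item_code item) := by
  unfold Pre_get_item_code; infer_instance

def pvWitness_get_item_code : List Int := [0, 0, 0, 0, 0, 0, 0, 0, 0, 66, 7, 0, 0, 0]

def Spec_get_item_code (item : List Int) (out : String) : Prop := out = get_item_code_alt item
instance (item : List Int) (out : String) : Decidable (Spec_get_item_code item out) := by unfold Spec_get_item_code; infer_instance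

-- ===== CLAIM (what is proved, stated in full; the proofs are below) =====
def Claim_equal_get_item_code : Prop := ∀ (item : List Int), Dom_get_item_code item → Pre_get_item_code item → Spec_get_item_code item (get_item_code item)

-- ===== LEMMAS AND PROOFS =====

def pvVal : List Int → Int
  | [] => 0
  | b :: t => b * 2 ^ t.length + pvVal t

theorem pvNatBits_lt (n : Nat) : n < 2 ^ (pvNatBits n).length := by
  induction n using Nat.strong_induction_on with
  | _ n ih =>
    rw [pvNatBits]
    split
    · simp; omega
    · rename_i h
      have := ih (n / 2) (Nat.div_lt_self (Nat.pos_of_ne_zero h) (by omega))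
      simp [List.length_append, pow_succ]
      omega

theorem pvNatBits_getD (n k : Nat) :
    (pvNatBits n).reverse.getD k '0' = if n / 2 ^ k % 2 = 1 then '1' else '0' := by
  induction n using Nat.strong_induction_on generalizing k with
  | _ n ih =>
    rw [pvNatBits]
    split
    · rename_i h; subst h; simp
    · rename_i h
      rw [List.reverse_append]
      simp only [List.reverse_singleton, List.singleton_append]
      cases k with
      | zero => simp
      | succ k =>
        have := ih (n / 2) (Nat.div_lt_self (Nat.pos_of_ne_zero h) (by omega)) k
        simp only [List.getD_cons_succ, this]
        rw [Nat.div_div_eq_div_mul]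
        ring_nf

theorem byte_to_bits_len (v : Int) : 8 ≤ (byte_to_bits v).length := by
  unfold byte_to_bits
  have h1 : (if v.natAbs = 0 then ['0'] else pvNatBits v.natAbs).length ≠ 0 := by
    split
    · simp
    · rename_i h
      have := pvNatBits_lt v.natAbs
      intro hc
      rw [hc] at this
      simp at this
      omega
  simp only [List.length_append, List.length_replicate]
  omega

theorem getD_all_zero (l : List Char) (k : Nat) (h : ∀ c ∈ l, c = '0') :
    l.getD k '0' = '0' := by
  unfold List.getD
  cases hm : l[k]? with
  | none => simp
  | some c => simp [h c (List.mem_of_getElem? hm)]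

theorem byte_to_bits_getD (v : Int) (hv : 0 ≤ v) (k : Nat) :
    (byte_to_bits v).reverse.getD k '0' = if v.toNat / 2 ^ k % 2 = 1 then '1' else '0' := by
  unfold byte_to_bits
  have hneg : ¬ v < 0 := by omega
  simp only [hneg, if_false, List.nil_append, List.reverse_append, List.reverse_replicate,
    List.length_nil]
  by_cases h0 : v.natAbs = 0
  · have : v.toNat = 0 := by omega
    simp only [h0, if_true, this, Nat.zero_div, Nat.zero_mod, if_neg (one_ne_zero ∘ Eq.symm)]
    exact getD_all_zero _ _ (by intro c hc; simpa using hc)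
  · simp only [h0, if_false]
    by_cases hk : k < (pvNatBits v.natAbs).length
    · rw [List.getD_append _ _ _ _ (by simpa using hk)]
      rw [show v.toNat = v.natAbs by omega]
      exact pvNatBits_getD v.natAbs k
    · have hbig : v.toNat / 2 ^ k = 0 := by
        apply Nat.div_eq_of_lt
        calc v.toNat = v.natAbs := by omega
        _ < 2 ^ (pvNatBits v.natAbs).length := pvNatBits_lt _
        _ ≤ 2 ^ k := Nat.pow_le_pow_right (by omega) (by omega)
      rw [hbig]
      simp only [Nat.zero_mod]
      rw [List.getD_append_right _ _ _ _ (by simpa using hk)]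
      exact getD_all_zero _ _ (fun c hc => List.eq_of_mem_replicate hc)

theorem byte_to_bits_getD_zero (v : Int) :
    (byte_to_bits v).reverse.getD 0 '0' = if v % 2 = 1 then '1' else '0' := by
  unfold byte_to_bits
  simp only [List.reverse_append]
  by_cases h0 : v.natAbs = 0
  · have hz : v = 0 := by omega
    subst hz
    simp
  · simp only [h0, if_false]
    rw [List.getD_append _ _ _ _ (by
      simp only [List.length_reverse]
      have := pvNatBits_lt v.natAbs
      by_contra hc
      simp at hc
      rw [hc] at this
      simp at this
      omega)]
    rw [pvNatBits_getD]
    simp only [pow_zero, Nat.div_one]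
    have : v.natAbs % 2 = 1 ↔ v % 2 = 1 := by omega
    split <;> split <;> simp_all

theorem take8_eq {α : Type} (l : List α) (d : α) (h : 8 ≤ l.length) :
    l = l.getD 0 d :: l.getD 1 d :: l.getD 2 d :: l.getD 3 d :: l.getD 4 d :: l.getD 5 d ::
        l.getD 6 d :: l.getD 7 d :: l.drop 8 := by
  match l, h with
  | a0::a1::a2::a3::a4::a5::a6::a7::t, _ => simp [List.getD]

theorem bor_shift (a b : Int) (ha : 0 ≤ a) (hb : b = 0 ∨ b = 1) :
    PySem.Int.bor (a <<< (1 : Nat)) b = 2 * a + b := by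
  have hs : a <<< (1 : Nat) = a * 2 := by rw [Int.shiftLeft_eq]; norm_num
  rcases hb with hb | hb <;> subst hb
  · simp [PySem.Int.bor_zero, hs]; ring
  · rw [hs, PySem.Int.bor_of_nonneg (by omega) (by omega)]
    have h2 : (a * 2).toNat = 2 * a.toNat := by omega
    have h1 : (1 : Int).toNat = 1 := rfl
    rw [h2, h1]
    have hlor : 2 * a.toNat ||| 1 = 2 * a.toNat + 1 := by
      have h := Nat.lor_bit false a.toNat true 0
      simp [Nat.bit] at h
      simpa [Nat.bit, two_mul] using h
    rw [hlor]
    omega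

theorem fold_bor (l : List Int) (a : Int) (ha : 0 ≤ a) (h : ∀ b ∈ l, b = 0 ∨ b = 1) :
    l.foldl (fun out b => PySem.Int.bor (out <<< (1 : Nat)) b) a = a * 2 ^ l.length + pvVal l := by
  induction l generalizing a with
  | nil => simp [pvVal]
  | cons b t ih =>
    have hb := h b (by simp)
    simp only [List.foldl_cons]
    rw [bor_shift a b ha hb]
    rw [ih (2 * a + b) (by omega) (fun x hx => h x (by simp [hx]))]
    simp [pvVal, List.length_cons, pow_succ]
    ring

theorem alt_bit' (v : Int) (hv : 0 ≤ v) (k : Nat) :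
    (PySem.Int.floordiv v ((1 : Int) <<< k)) % 2 =
      if v.toNat / 2 ^ k % 2 = 1 then 1 else 0 := by
  have hsh : (1 : Int) <<< k = ((2 ^ k : Nat) : Int) := by
    rw [Int.shiftLeft_eq]; push_cast; ring
  rw [hsh, PySem.Int.floordiv_eq_ediv_of_pos (by positivity)]
  have hv' : v = (v.toNat : Int) := by omega
  rw [hv']
  rw [← Int.natCast_div]
  simp only [Int.toNat_natCast]
  set x := v.toNat / 2 ^ k with hx
  rw [show ((x : Int) % 2) = ((x % 2 : Nat) : Int) from (Int.natCast_mod x 2).symm]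
  rcases Nat.mod_two_eq_zero_or_one x with h | h <;> simp [h, ← hx]

theorem read76 (item : List Int) (h1 : 0 ≤ PySem.List.pyGetD item 9 0) (h2 : 0 ≤ PySem.List.pyGetD item 10 0) :
    read_bits item 76 8 = read_bits_alt item 76 8 := by
  unfold read_bits read_bits_alt reverse_bits
  simp only [show PySem.Int.truncdiv 76 8 = 9 from rfl,
    show PySem.Int.truncdiv (76+8) 8 = 10 from rfl,
    show (10 : Int) - 9 + 1 = 2 from rfl,
    show PySem.List.pyRange 0 2 1 = [0, 1] from by decide,
    show PySem.List.pyRange 0 8 1 = [0,1,2,3,4,5,6,7] from by decide]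
  simp only [List.foldl_cons, List.foldl_nil, List.map_cons, List.map_nil]
  norm_num
  set a := PySem.List.pyGetD item 9 0 with ha
  set b := PySem.List.pyGetD item 10 0 with hb
  have hla : 8 ≤ (byte_to_bits a).reverse.length := by simpa using byte_to_bits_len a
  have hlb : 8 ≤ (byte_to_bits b).reverse.length := by simpa using byte_to_bits_len b
  rw [take8_eq _ '0' hla, take8_eq _ '0' hlb]
  simp only [List.zip_cons_cons, List.filterMap_cons]
  norm_num
  unfold bit_string_to_int
  rw [show ∀ l : List Char, l.foldl (fun out bit => PySem.Int.bor (out <<< (1:Nat)) (pvCharToInt bit)) 0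
        = (l.map pvCharToInt).foldl (fun out bit => PySem.Int.bor (out <<< (1:Nat)) bit) 0 from
      fun l => (List.foldl_map (f := pvCharToInt) (g := fun out bit => PySem.Int.bor (out <<< (1:Nat)) bit) (l := l) (init := 0)).symm]
  rw [fold_bor _ 0 le_rfl (by
    intro x hx
    simp only [List.mem_map] at hx
    obtain ⟨c, _, rfl⟩ := hx
    unfold pvCharToInt
    split <;> simp)]
  simp only [List.map_cons, List.map_nil, pvVal, List.length_cons, List.length_nil]
  simp only [← List.getD_eq_getElem?_getD]
  rw [byte_to_bits_getD a h1 4, byte_to_bits_getD a h1 5, byte_to_bits_getD a h1 6,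
      byte_to_bits_getD a h1 7, byte_to_bits_getD b h2 0, byte_to_bits_getD b h2 1,
      byte_to_bits_getD b h2 2, byte_to_bits_getD b h2 3]
  simp only [pvCharToInt, apply_ite (fun c : Char => if c = '1' then (1:Int) else 0),
    if_neg (by decide : ¬ '0' = '1')]
  simp only [show Int.toNat 2 = 2 from rfl, show Int.toNat 3 = 3 from rfl,
    show Int.toNat 4 = 4 from rfl, show Int.toNat 5 = 5 from rfl, show Int.toNat 6 = 6 from rfl,
    show Int.toNat 7 = 7 from rfl, if_true]
  rw [alt_bit' a h1 4, alt_bit' a h1 5, alt_bit' a h1 6, alt_bit' a h1 7,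
      alt_bit' b h2 1, alt_bit' b h2 2, alt_bit' b h2 3]
  have hb0 : b % 2 = if b.toNat / 2 ^ 0 % 2 = 1 then 1 else 0 := by
    have := alt_bit' b h2 0
    rwa [show ((1:Int) <<< (0:Nat)) = 1 from rfl,
      PySem.Int.floordiv_eq_ediv_of_pos (b := 1) (by omega), Int.ediv_one] at this
  rw [hb0]
  simp only [Int.shiftLeft_eq]
  ring

theorem read84 (item : List Int) (h1 : 0 ≤ PySem.List.pyGetD item 10 0) (h2 : 0 ≤ PySem.List.pyGetD item 11 0) :
    read_bits item 84 8 = read_bits_alt item 84 8 := by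
  unfold read_bits read_bits_alt reverse_bits
  simp only [show PySem.Int.truncdiv 84 8 = 10 from rfl,
    show PySem.Int.truncdiv (84+8) 8 = 11 from rfl,
    show (11 : Int) - 10 + 1 = 2 from rfl,
    show PySem.List.pyRange 0 2 1 = [0, 1] from by decide,
    show PySem.List.pyRange 0 8 1 = [0,1,2,3,4,5,6,7] from by decide]
  simp only [List.foldl_cons, List.foldl_nil, List.map_cons, List.map_nil]
  norm_num
  set a := PySem.List.pyGetD item 10 0 with ha
  set b := PySem.List.pyGetD item 11 0 with hb
  have hla : 8 ≤ (byte_to_bits a).reverse.length := by simpa using byte_to_bits_len a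
  have hlb : 8 ≤ (byte_to_bits b).reverse.length := by simpa using byte_to_bits_len b
  rw [take8_eq _ '0' hla, take8_eq _ '0' hlb]
  simp only [List.zip_cons_cons, List.filterMap_cons]
  norm_num
  unfold bit_string_to_int
  rw [show ∀ l : List Char, l.foldl (fun out bit => PySem.Int.bor (out <<< (1:Nat)) (pvCharToInt bit)) 0
        = (l.map pvCharToInt).foldl (fun out bit => PySem.Int.bor (out <<< (1:Nat)) bit) 0 from
      fun l => (List.foldl_map (f := pvCharToInt) (g := fun out bit => PySem.Int.bor (out <<< (1:Nat)) bit) (l := l) (init := 0)).symm]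
  rw [fold_bor _ 0 le_rfl (by
    intro x hx
    simp only [List.mem_map] at hx
    obtain ⟨c, _, rfl⟩ := hx
    unfold pvCharToInt
    split <;> simp)]
  simp only [List.map_cons, List.map_nil, pvVal, List.length_cons, List.length_nil]
  simp only [← List.getD_eq_getElem?_getD]
  rw [byte_to_bits_getD a h1 4, byte_to_bits_getD a h1 5, byte_to_bits_getD a h1 6,
      byte_to_bits_getD a h1 7, byte_to_bits_getD b h2 0, byte_to_bits_getD b h2 1,
      byte_to_bits_getD b h2 2, byte_to_bits_getD b h2 3]
  simp only [pvCharToInt, apply_ite (fun c : Char => if c = '1' then (1:Int) else 0),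
    if_neg (by decide : ¬ '0' = '1')]
  simp only [show Int.toNat 2 = 2 from rfl, show Int.toNat 3 = 3 from rfl,
    show Int.toNat 4 = 4 from rfl, show Int.toNat 5 = 5 from rfl, show Int.toNat 6 = 6 from rfl,
    show Int.toNat 7 = 7 from rfl, if_true]
  rw [alt_bit' a h1 4, alt_bit' a h1 5, alt_bit' a h1 6, alt_bit' a h1 7,
      alt_bit' b h2 1, alt_bit' b h2 2, alt_bit' b h2 3]
  have hb0 : b % 2 = if b.toNat / 2 ^ 0 % 2 = 1 then 1 else 0 := by
    have := alt_bit' b h2 0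
    rwa [show ((1:Int) <<< (0:Nat)) = 1 from rfl,
      PySem.Int.floordiv_eq_ediv_of_pos (b := 1) (by omega), Int.ediv_one] at this
  rw [hb0]
  simp only [Int.shiftLeft_eq]
  ring

theorem read92 (item : List Int) (h1 : 0 ≤ PySem.List.pyGetD item 11 0) (h2 : 0 ≤ PySem.List.pyGetD item 12 0) :
    read_bits item 92 8 = read_bits_alt item 92 8 := by
  unfold read_bits read_bits_alt reverse_bits
  simp only [show PySem.Int.truncdiv 92 8 = 11 from rfl,
    show PySem.Int.truncdiv (92+8) 8 = 12 from rfl,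
    show (12 : Int) - 11 + 1 = 2 from rfl,
    show PySem.List.pyRange 0 2 1 = [0, 1] from by decide,
    show PySem.List.pyRange 0 8 1 = [0,1,2,3,4,5,6,7] from by decide]
  simp only [List.foldl_cons, List.foldl_nil, List.map_cons, List.map_nil]
  norm_num
  set a := PySem.List.pyGetD item 11 0 with ha
  set b := PySem.List.pyGetD item 12 0 with hb
  have hla : 8 ≤ (byte_to_bits a).reverse.length := by simpa using byte_to_bits_len a
  have hlb : 8 ≤ (byte_to_bits b).reverse.length := by simpa using byte_to_bits_len b
  rw [take8_eq _ '0' hla, take8_eq _ '0' hlb]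
  simp only [List.zip_cons_cons, List.filterMap_cons]
  norm_num
  unfold bit_string_to_int
  rw [show ∀ l : List Char, l.foldl (fun out bit => PySem.Int.bor (out <<< (1:Nat)) (pvCharToInt bit)) 0
        = (l.map pvCharToInt).foldl (fun out bit => PySem.Int.bor (out <<< (1:Nat)) bit) 0 from
      fun l => (List.foldl_map (f := pvCharToInt) (g := fun out bit => PySem.Int.bor (out <<< (1:Nat)) bit) (l := l) (init := 0)).symm]
  rw [fold_bor _ 0 le_rfl (by
    intro x hx
    simp only [List.mem_map] at hx
    obtain ⟨c, _, rfl⟩ := hx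
    unfold pvCharToInt
    split <;> simp)]
  simp only [List.map_cons, List.map_nil, pvVal, List.length_cons, List.length_nil]
  simp only [← List.getD_eq_getElem?_getD]
  rw [byte_to_bits_getD a h1 4, byte_to_bits_getD a h1 5, byte_to_bits_getD a h1 6,
      byte_to_bits_getD a h1 7, byte_to_bits_getD b h2 0, byte_to_bits_getD b h2 1,
      byte_to_bits_getD b h2 2, byte_to_bits_getD b h2 3]
  simp only [pvCharToInt, apply_ite (fun c : Char => if c = '1' then (1:Int) else 0),
    if_neg (by decide : ¬ '0' = '1')]
  simp only [show Int.toNat 2 = 2 from rfl, show Int.toNat 3 = 3 from rfl,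
    show Int.toNat 4 = 4 from rfl, show Int.toNat 5 = 5 from rfl, show Int.toNat 6 = 6 from rfl,
    show Int.toNat 7 = 7 from rfl, if_true]
  rw [alt_bit' a h1 4, alt_bit' a h1 5, alt_bit' a h1 6, alt_bit' a h1 7,
      alt_bit' b h2 1, alt_bit' b h2 2, alt_bit' b h2 3]
  have hb0 : b % 2 = if b.toNat / 2 ^ 0 % 2 = 1 then 1 else 0 := by
    have := alt_bit' b h2 0
    rwa [show ((1:Int) <<< (0:Nat)) = 1 from rfl,
      PySem.Int.floordiv_eq_ediv_of_pos (b := 1) (by omega), Int.ediv_one] at this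
  rw [hb0]
  simp only [Int.shiftLeft_eq]
  ring

theorem read100 (item : List Int) (h1 : 0 ≤ PySem.List.pyGetD item 12 0) (h2 : 0 ≤ PySem.List.pyGetD item 13 0) :
    read_bits item 100 8 = read_bits_alt item 100 8 := by
  unfold read_bits read_bits_alt reverse_bits
  simp only [show PySem.Int.truncdiv 100 8 = 12 from rfl,
    show PySem.Int.truncdiv (100+8) 8 = 13 from rfl,
    show (13 : Int) - 12 + 1 = 2 from rfl,
    show PySem.List.pyRange 0 2 1 = [0, 1] from by decide,
    show PySem.List.pyRange 0 8 1 = [0,1,2,3,4,5,6,7] from by decide]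
  simp only [List.foldl_cons, List.foldl_nil, List.map_cons, List.map_nil]
  norm_num
  set a := PySem.List.pyGetD item 12 0 with ha
  set b := PySem.List.pyGetD item 13 0 with hb
  have hla : 8 ≤ (byte_to_bits a).reverse.length := by simpa using byte_to_bits_len a
  have hlb : 8 ≤ (byte_to_bits b).reverse.length := by simpa using byte_to_bits_len b
  rw [take8_eq _ '0' hla, take8_eq _ '0' hlb]
  simp only [List.zip_cons_cons, List.filterMap_cons]
  norm_num
  unfold bit_string_to_int
  rw [show ∀ l : List Char, l.foldl (fun out bit => PySem.Int.bor (out <<< (1:Nat)) (pvCharToInt bit)) 0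
        = (l.map pvCharToInt).foldl (fun out bit => PySem.Int.bor (out <<< (1:Nat)) bit) 0 from
      fun l => (List.foldl_map (f := pvCharToInt) (g := fun out bit => PySem.Int.bor (out <<< (1:Nat)) bit) (l := l) (init := 0)).symm]
  rw [fold_bor _ 0 le_rfl (by
    intro x hx
    simp only [List.mem_map] at hx
    obtain ⟨c, _, rfl⟩ := hx
    unfold pvCharToInt
    split <;> simp)]
  simp only [List.map_cons, List.map_nil, pvVal, List.length_cons, List.length_nil]
  simp only [← List.getD_eq_getElem?_getD]
  rw [byte_to_bits_getD a h1 4, byte_to_bits_getD a h1 5, byte_to_bits_getD a h1 6,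
      byte_to_bits_getD a h1 7, byte_to_bits_getD b h2 0, byte_to_bits_getD b h2 1,
      byte_to_bits_getD b h2 2, byte_to_bits_getD b h2 3]
  simp only [pvCharToInt, apply_ite (fun c : Char => if c = '1' then (1:Int) else 0),
    if_neg (by decide : ¬ '0' = '1')]
  simp only [show Int.toNat 2 = 2 from rfl, show Int.toNat 3 = 3 from rfl,
    show Int.toNat 4 = 4 from rfl, show Int.toNat 5 = 5 from rfl, show Int.toNat 6 = 6 from rfl,
    show Int.toNat 7 = 7 from rfl, if_true]
  rw [alt_bit' a h1 4, alt_bit' a h1 5, alt_bit' a h1 6, alt_bit' a h1 7,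
      alt_bit' b h2 1, alt_bit' b h2 2, alt_bit' b h2 3]
  have hb0 : b % 2 = if b.toNat / 2 ^ 0 % 2 = 1 then 1 else 0 := by
    have := alt_bit' b h2 0
    rwa [show ((1:Int) <<< (0:Nat)) = 1 from rfl,
      PySem.Int.floordiv_eq_ediv_of_pos (b := 1) (by omega), Int.ediv_one] at this
  rw [hb0]
  simp only [Int.shiftLeft_eq]
  ring

theorem is_ear_read_eq (item : List Int) : read_bits item 32 1 = read_bits_alt item 32 1 := by
  unfold read_bits read_bits_alt reverse_bits
  simp only [show PySem.Int.truncdiv 32 8 = 4 from rfl,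
    show PySem.Int.truncdiv (32+1) 8 = 4 from rfl,
    show (4 : Int) - 4 + 1 = 1 from rfl,
    show PySem.List.pyRange 0 1 1 = [0] from by decide,
    show PySem.List.pyRange 0 8 1 = [0,1,2,3,4,5,6,7] from by decide]
  simp only [List.foldl_cons, List.foldl_nil, List.map_cons, List.map_nil]
  norm_num
  set v := PySem.List.pyGetD item 4 0 with hv
  have hlen : 8 ≤ (byte_to_bits v).reverse.length := by
    simpa using byte_to_bits_len v
  rw [take8_eq _ '0' hlen]
  simp only [List.zip_cons_cons, List.filterMap_cons]
  norm_num
  unfold bit_string_to_int pvCharToInt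
  simp only [List.foldl_cons, List.foldl_nil, ← List.getD_eq_getElem?_getD]
  rw [byte_to_bits_getD_zero v]
  rcases Int.emod_two_eq v with h | h <;>
    simp [h, show PySem.Int.bor (0:Int) 1 = 1 from by decide,
      show PySem.Int.bor (0:Int) 0 = 0 from by decide]


-- B's single-bit read at offset 32 evaluates to the parity of byte 4
theorem is_ear_alt_val (item : List Int) :
    read_bits_alt item 32 1 = PySem.List.pyGetD item 4 0 % 2 := by
  unfold read_bits_alt
  simp only [show PySem.List.pyRange 0 1 1 = [0] from by decide,
    List.foldl_cons, List.foldl_nil]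
  norm_num

theorem is_ear_eq (item : List Int) : is_ear item = is_ear_alt item :=
  is_ear_read_eq item

-- ===== VERDICT (by name: the statement is the Claim_ definition above) =====
theorem get_item_code_spec : Claim_equal_get_item_code := by
  intro item _ hpre
  unfold Spec_get_item_code get_item_code get_item_code_alt
  rw [is_ear_eq item]
  by_cases hc : is_ear_alt item ≠ 0
  · rw [if_pos hc, if_pos hc]
  · rw [if_neg hc, if_neg hc]
    rw [not_not] at hc
    obtain ⟨hlen5, hdisj⟩ := hpre
    have hgd4 : PySem.List.pyGetD item (4 : Int) 0 = item.getD 4 0 := by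
      simp [pysem]
    have hpar : item.getD 4 0 % 2 = 0 := by
      have := is_ear_alt_val item
      unfold is_ear_alt at hc
      rw [this, hgd4] at hc
      exact hc
    rcases hdisj with h | ⟨hlen, hnn⟩
    · exact absurd hpar h
    · have hb : ∀ j ∈ [(9:Nat), 10, 11, 12, 13], 0 ≤ PySem.List.pyGetD item (j : Int) 0 := by
        intro j hj
        have h1 := hnn j hj
        simpa [pysem] using h1
      have h9 := hb 9 (by simp)
      have h10 := hb 10 (by simp)
      have h11 := hb 11 (by simp)
      have h12 := hb 12 (by simp)
      have h13 := hb 13 (by simp)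
      norm_num at h9 h10 h11 h12 h13
      simp only [show PySem.List.pyRange 0 4 1 = [0, 1, 2, 3] from by decide,
        List.foldl_cons, List.foldl_nil]
      norm_num
      rw [read76 item h9 h10, read84 item h10 h11, read92 item h11 h12, read100 item h12 h13]
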